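-- pv_equiv track=rewrite | github.com/lexust1/code4fun | Python/mfti_algos/lec14_05_repeat/ex04_array.py | count_remainders
-- ===== SOURCE A (Python) =====
-- def count_remainders(arr: list) -> float:
--     """Counts remainders."""
--     cnt = 1
--     sum_el = 0
--     sum_rem = 0
--     for el in arr:
--         sum_el += el
--         if cnt % 3 == 0:
--             sum_rem += sum_el % el
--             sum_el = 0
--         cnt += 1
--     return sum_rem
-- ===== SOURCE B (Python) =====
-- def count_remainders(arr: list) -> float:
--     """Counts remainders by grouping the elements into consecutive triples with zip."""
--     it = iter(arr)
--     sum_rem = 0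
--     for a, b, c in zip(it, it, it):
--         sum_rem += (a + b + c) % c
--     return sum_rem
-- ===== Notes on version B (the rewrite author's own statement) =====
-- stated objective: idiomatic
-- what changed: Replaces the counter/running-sum state machine with the standard grouper idiom: zip the iterator with itself to get consecutive triples (a, b, c) and accumulate (a+b+c) % c.
import Mathlib
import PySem

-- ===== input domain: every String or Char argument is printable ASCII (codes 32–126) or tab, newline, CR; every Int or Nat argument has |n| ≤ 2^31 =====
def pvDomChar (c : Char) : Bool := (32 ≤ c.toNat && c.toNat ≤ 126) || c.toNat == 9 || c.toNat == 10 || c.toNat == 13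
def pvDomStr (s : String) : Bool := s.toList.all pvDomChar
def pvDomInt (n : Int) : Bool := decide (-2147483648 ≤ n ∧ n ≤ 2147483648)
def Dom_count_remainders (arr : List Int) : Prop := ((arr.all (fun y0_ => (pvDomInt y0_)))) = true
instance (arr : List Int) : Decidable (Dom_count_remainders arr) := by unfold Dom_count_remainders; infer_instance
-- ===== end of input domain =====

-- B groups the elements into consecutive triples with the zip-an-iterator-with-itself idiom instead of tracking a counter and running sum; same O(n) cost, plainer structure.

-- ===== PORT A =====
-- loop state: (cnt, sum_el, sum_rem), as in A
def count_remainders_step (s : Int × Int × Int) (el : Int) : Int × Int × Int :=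
  let cnt := s.1
  let sum_el := s.2.1 + el
  let sum_rem := s.2.2
  if cnt % 3 == 0 then (cnt + 1, 0, sum_rem + PySem.Int.mod sum_el el)
  else (cnt + 1, sum_el, sum_rem)

def count_remainders (arr : List Int) : Int :=
  (arr.foldl count_remainders_step (1, 0, 0)).2.2

-- ===== PORT B =====
-- zip(it, it, it) on a shared iterator yields the consecutive triples of arr:
def pyZip3Iter : List Int → List (Int × Int × Int)
  | a :: b :: c :: rest => (a, b, c) :: pyZip3Iter rest
  | _ => []   -- zip stops when the iterator has fewer than 3 elements left

def count_remainders_alt (arr : List Int) : Int :=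
  (pyZip3Iter arr).foldl (fun sum_rem t => sum_rem + PySem.Int.mod (t.1 + t.2.1 + t.2.2) t.2.2) 0

-- ===== PRECONDITION & SPEC =====
-- Pre_ excludes exactly the inputs on which Python A raises ZeroDivisionError:
-- a zero at the third position of a complete group (index ≡ 2 mod 3).
def Pre_count_remainders (arr : List Int) : Prop :=
  ∀ i : Fin arr.length, i.val % 3 = 2 → arr.get i ≠ 0
instance (arr : List Int) : Decidable (Pre_count_remainders arr) := by
  unfold Pre_count_remainders; infer_instance
def pvWitness_count_remainders : List Int := [1, 2, 3, 4, 5, -2, 7]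

def Spec_count_remainders (arr : List Int) (out : Int) : Prop := out = count_remainders_alt arr
instance (arr : List Int) (out : Int) : Decidable (Spec_count_remainders arr out) := by unfold Spec_count_remainders; infer_instance

-- ===== CLAIM (what is proved, stated in full; the proofs are below) =====
def Claim_equal_count_remainders : Prop := ∀ (arr : List Int), Dom_count_remainders arr → Pre_count_remainders arr → Spec_count_remainders arr (count_remainders arr)

-- ===== LEMMAS AND PROOFS =====

-- shifting the initial accumulator out of B's additive fold
theorem foldl_add_shift (f : Int × Int × Int → Int) (l : List (Int × Int × Int)) :
    ∀ r : Int, l.foldl (fun s t => s + f t) r = r + l.foldl (fun s t => s + f t) 0 := by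
  induction l with
  | nil => simp
  | cons t l ih => intro r; simp only [List.foldl]; rw [ih, ih (0 + f t)]; ring

theorem alt_cons (a b c : Int) (rest : List Int) :
    count_remainders_alt (a :: b :: c :: rest) =
      PySem.Int.mod (a + b + c) c + count_remainders_alt rest := by
  unfold count_remainders_alt
  rw [show pyZip3Iter (a :: b :: c :: rest) = (a, b, c) :: pyZip3Iter rest from rfl]
  simp only [List.foldl]
  rw [foldl_add_shift]
  ring

-- Loop invariant for A's fold: starting at a counter ≡ 1 (mod 3) with sum_el = 0,
-- the fold adds B's recursive value to the accumulated remainder.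
theorem count_remainders_fold_inv (arr : List Int) :
    ∀ (k r : Int), k % 3 = 1 →
      (arr.foldl count_remainders_step (k, 0, r)).2.2 = r + count_remainders_alt arr := by
  induction arr using pyZip3Iter.induct with
  | case1 a b c rest ih =>
    intro k r hk
    have h1 : (k % 3 == 0) = false := by simp; omega
    have h2 : ((k + 1) % 3 == 0) = false := by simp; omega
    have h3 : ((k + 1 + 1) % 3 == 0) = true := by simp; omega
    simp only [List.foldl, count_remainders_step, h1, h2, h3, if_true, if_false,
      Bool.false_eq_true]
    rw [ih (k + 1 + 1 + 1) _ (by omega), alt_cons]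
    ring
  | case2 xs hne =>
    intro k r hk
    have h1 : (k % 3 == 0) = false := by simp; omega
    have h2 : ((k + 1) % 3 == 0) = false := by simp; omega
    rcases xs with _ | ⟨a, _ | ⟨b, _ | ⟨c, rest⟩⟩⟩
    · simp [count_remainders_alt, pyZip3Iter]
    · simp [List.foldl, count_remainders_step, h1, count_remainders_alt, pyZip3Iter]
    · simp [List.foldl, count_remainders_step, h1, h2, count_remainders_alt, pyZip3Iter]
    · exact absurd rfl (hne a b c rest)

-- ===== VERDICT (by name: the statement is the Claim_ definition above) =====
theorem count_remainders_spec : Claim_equal_count_remainders := by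
  intro arr _ _
  unfold Spec_count_remainders count_remainders
  rw [count_remainders_fold_inv arr 1 0 (by decide)]
  ring
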